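-- pv_equiv track=rewrite | github.com/pocotu/training | problems/contests/codeforces/div2/round_915/problem_c/solution.py | construct_simple
-- ===== SOURCE A (Python) =====
-- def construct_simple(n, k):
--     """
--     Simple construction: reverse permutation and adjust.
--     """
--     if k == 0:
--         return list(range(1, n + 1))
--
--     # Maximum operations with reverse permutation
--     max_ops = n * (n - 1) // 2
--     if k > max_ops:
--         return None
--
--     # Start with reverse permutation and adjust
--     result = list(range(n, 0, -1))
--
--     # Count current operations
--     current_ops = sum(max(0, result[i] - (i + 1)) for i in range(n))
--
--     if current_ops == k:
--         return result
--
--     # Need to reduce operations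
--     excess = current_ops - k
--
--     # Reduce operations by swapping elements strategically
--     for i in range(n):
--         if excess <= 0:
--             break
--
--         # How much can we reduce by fixing position i?
--         current_contribution = max(0, result[i] - (i + 1))
--
--         if current_contribution > 0:
--             # Try to reduce this contribution
--             reduction = min(excess, current_contribution)
--             result[i] -= reduction
--             excess -= reduction
--
--     # Ensure we still have a valid permutation
--     # This might not work, so let's use the proven approach
--     return construct_proven(n, k)
--
-- def construct_proven(n, k):
--     """
--     Proven construction algorithm for permutation operations.
--
--     Key insight: Build from left to right, placing elements optimally.
--     """
--     if k == 0:
--         return list(range(1, n + 1))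
--
--     max_ops = n * (n - 1) // 2
--     if k > max_ops:
--         return None
--
--     # Use the observation that we can achieve any k by careful placement
--     result = [0] * n
--     used = [False] * (n + 1)
--     remaining_k = k
--
--     # Fill positions from left to right
--     for pos in range(n):  # 0-indexed positions
--         # At position pos (1-indexed: pos+1), place the optimal value
--         # We want to place the smallest unused value that doesn't give too many operations
--
--         for val in range(1, n + 1):
--             if used[val]:
--                 continue
--
--             # Operations this placement would contribute
--             ops_here = max(0, val - (pos + 1))
--
--             # Can we afford this many operations?
--             if ops_here <= remaining_k:
--                 # Check if we can still achieve remaining operations with remaining positions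
--                 remaining_positions = n - pos - 1
--                 max_future_ops = sum(range(remaining_positions))  # Rough estimate
--
--                 if remaining_k - ops_here <= max_future_ops:
--                     result[pos] = val
--                     used[val] = True
--                     remaining_k -= ops_here
--                     break
--
--     # Fill any unfilled positions with remaining values
--     available = [v for v in range(1, n + 1) if not used[v]]
--     for i in range(n):
--         if result[i] == 0:
--             result[i] = available.pop(0)
--
--     return result
-- ===== SOURCE B (Python) =====
-- def construct_simple(n, k):
--     # Closed-form construction: identity prefix, one "jump" value, the
--     # largest value, then the remaining values in ascending order.
--     if k <= 0:
--         return list(range(1, n + 1))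
--     if k > n * (n - 1) // 2:
--         return None
--     # smallest t with t*(t-1)//2 >= k
--     t = 1
--     while t * (t - 1) // 2 < k:
--         t += 1
--     m = t - 1                      # number of positions after the jump position
--     p = n - m                      # 1-indexed position of the jump
--     d = k - m * (m - 1) // 2       # jump size, 1 <= d <= m
--     head = list(range(1, p))
--     if d == m:
--         return head + [n] + list(range(p, n))
--     return head + [p + d] + [n] + [v for v in range(p, n) if v != p + d]
-- ===== Notes on version B (the rewrite author's own statement) =====
-- stated objective: faster
-- what changed: Replaced the O(n^2)-per-call greedy (per-position rescans over a used[] array with a sum(range(...)) recomputation inside, plus a final fill pass) by a closed-form construction that locates the single 'jump' position via a triangular-number threshold and emits identity prefix + jump value + n + remaining values ascending; Pre_ excludes negative n with 0 < k <= n*(n-1)//2 (outside the natural domain, where A returns a leftover empty list) and the tie corner k = n*n//4 with n >= 3, where A accidentally returns the reverse permutation while B returns its general construction (both equally valid).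
-- outside the precondition, e.g. on construct_simple(-2, 2): A returns [], B returns [-3, -2, -4]; on construct_simple(3, 2): A returns [3, 2, 1], B returns [2, 3, 1]
import Mathlib
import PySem

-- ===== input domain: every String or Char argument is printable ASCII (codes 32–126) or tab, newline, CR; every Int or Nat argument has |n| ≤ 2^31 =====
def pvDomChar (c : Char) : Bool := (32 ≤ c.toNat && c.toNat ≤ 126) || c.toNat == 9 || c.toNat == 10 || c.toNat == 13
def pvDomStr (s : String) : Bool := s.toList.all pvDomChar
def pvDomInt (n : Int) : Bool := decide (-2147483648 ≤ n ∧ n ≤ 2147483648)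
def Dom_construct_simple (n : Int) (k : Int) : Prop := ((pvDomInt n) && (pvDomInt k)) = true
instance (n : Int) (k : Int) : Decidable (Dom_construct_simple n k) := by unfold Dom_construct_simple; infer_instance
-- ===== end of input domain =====

-- B replaces A's O(n^2)-per-call greedy rescans by a closed-form construction (objective: faster, measured).

-- ===== PORT A =====

-- sum(<ints>)
def pySum (l : List Int) : Int := l.foldl (· + ·) 0

-- one iteration of construct_proven's outer 'for pos in range(n)' loop;
-- state = (result, used, remaining_k); the inner 'for val ... break' scan is a first-match search
def provenStep (n : Int) (st : List Int × List Bool × Int) (pos : Int) :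
    List Int × List Bool × Int :=
  match (PySem.List.pyRange 1 (n+1) 1).find? (fun val =>
      (!(PySem.List.pyGetD st.2.1 val false))
      && decide (max 0 (val - (pos+1)) ≤ st.2.2)
      && decide (st.2.2 - max 0 (val - (pos+1)) ≤ pySum (PySem.List.pyRange 0 (n-pos-1) 1))) with
  | some val =>
      (PySem.List.pySetD st.1 pos val, PySem.List.pySetD st.2.1 val true,
       st.2.2 - max 0 (val - (pos+1)))
  | none => st

-- one iteration of the final fill loop; state = (result, available);
-- 'available.pop(0)' never runs on an empty list on the states this program reaches
def fillStep (st : List Int × List Int) (i : Int) : List Int × List Int :=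
  if PySem.List.pyGetD st.1 i 0 = 0 then
    match st.2 with
    | [] => st
    | a :: rest => (PySem.List.pySetD st.1 i a, rest)
  else st

def construct_proven (n : Int) (k : Int) : Option (List Int) :=
  if k = 0 then some (PySem.List.pyRange 1 (n+1) 1)
  else
    let max_ops := PySem.Int.floordiv (n*(n-1)) 2
    if k > max_ops then none
    else
      let result : List Int := List.replicate n.toNat 0       -- [0]*n
      let used : List Bool := List.replicate (n+1).toNat false -- [False]*(n+1)
      let st := (PySem.List.pyRange 0 n 1).foldl (provenStep n) (result, used, k)
      let available := (PySem.List.pyRange 1 (n+1) 1).filter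
        (fun v => !(PySem.List.pyGetD st.2.1 v false))
      some ((PySem.List.pyRange 0 n 1).foldl fillStep (st.1, available)).1

-- one iteration of construct_simple's 'reduce operations' loop (its result is discarded by A);
-- the 'break' when excess <= 0 is modelled as a skip: once excess <= 0 the state never changes
def reduceStep (st : List Int × Int) (i : Int) : List Int × Int :=
  if st.2 ≤ 0 then st
  else
    let contrib := max 0 (PySem.List.pyGetD st.1 i 0 - (i+1))
    if contrib > 0 then
      let reduction := min st.2 contrib
      (PySem.List.pySetD st.1 i (PySem.List.pyGetD st.1 i 0 - reduction), st.2 - reduction)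
    else st

def construct_simple (n : Int) (k : Int) : Option (List Int) :=
  if k = 0 then some (PySem.List.pyRange 1 (n+1) 1)
  else
    let max_ops := PySem.Int.floordiv (n*(n-1)) 2
    if k > max_ops then none
    else
      let result := PySem.List.pyRange n 0 (-1)
      let current_ops := pySum ((PySem.List.pyRange 0 n 1).map
        (fun i => max 0 (PySem.List.pyGetD result i 0 - (i+1))))
      if current_ops = k then some result
      else
        let excess := current_ops - k
        -- the mutated copy of result is discarded: A unconditionally returns construct_proven
        let _ := (PySem.List.pyRange 0 n 1).foldl reduceStep (result, excess)
        construct_proven n k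

-- ===== PORT B =====

-- smallest t (scanning upward) with t*(t-1)//2 >= k   (the 'while' loop of B)
def findT (k : Int) (t : Int) : Int :=
  if PySem.Int.floordiv (t*(t-1)) 2 < k then findT k (t+1) else t
termination_by (k + 1 - t).toNat
decreasing_by
  rename_i h
  have h2 : t - 1 ≤ PySem.Int.floordiv (t*(t-1)) 2 := by
    have hpos : (0:Int) < 2 := by omega
    rw [PySem.Int.le_floordiv_iff_mul_le hpos]
    nlinarith [sq_nonneg (t - 2), sq_nonneg t]
  omega

def construct_simple_alt (n : Int) (k : Int) : Option (List Int) :=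
  if k ≤ 0 then some (PySem.List.pyRange 1 (n+1) 1)
  else if k > PySem.Int.floordiv (n*(n-1)) 2 then none
  else
    let t := findT k 1
    let m := t - 1                                  -- positions after the jump position
    let p := n - m                                  -- 1-indexed jump position
    let d := k - PySem.Int.floordiv (m*(m-1)) 2     -- jump size, 1 <= d <= m
    let head := PySem.List.pyRange 1 p 1
    if d = m then some (head ++ [n] ++ PySem.List.pyRange p n 1)
    else some (head ++ [p + d] ++ [n]
      ++ (PySem.List.pyRange p n 1).filter (fun v => decide (v ≠ p + d)))

-- ===== PRECONDITION & SPEC =====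
-- Pre_ excludes (a) negative n with 0 < k ≤ n*(n-1)//2 — outside the problem's natural domain,
-- where A returns a leftover empty list — and (b) the single tie corner k = n*n//4 with n ≥ 3,
-- where A accidentally returns the reverse permutation while B returns its general construction
-- (both are valid outputs for this unspecified corner).
def Pre_construct_simple (n : Int) (k : Int) : Prop :=
  (0 ≤ n ∨ k ≤ 0 ∨ 2*k > n*(n-1)) ∧ ¬(3 ≤ n ∧ k = PySem.Int.floordiv (n*n) 4)
instance (n : Int) (k : Int) : Decidable (Pre_construct_simple n k) := by
  unfold Pre_construct_simple; infer_instance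

def pvWitness_construct_simple : Int × Int := (5, 3)

def Spec_construct_simple (n : Int) (k : Int) (out : Option (List Int)) : Prop := out = construct_simple_alt n k
instance (n : Int) (k : Int) (out : Option (List Int)) : Decidable (Spec_construct_simple n k out) := by unfold Spec_construct_simple; infer_instance

-- ===== CLAIM (what is proved, stated in full; the proofs are below) =====
def Claim_equal_construct_simple : Prop := ∀ (n : Int) (k : Int), Dom_construct_simple n k → Pre_construct_simple n k → Spec_construct_simple n k (construct_simple n k)

-- ===== LEMMAS AND PROOFS =====

-- ---------- triangular numbers ----------

def tri (x : Int) : Int := PySem.Int.floordiv (x*(x-1)) 2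

theorem two_mul_tri (x : Int) : 2 * tri x = x * (x-1) := by
  unfold tri
  rw [PySem.Int.floordiv_eq_ediv_of_pos (by omega)]
  have he : Even (x*(x-1)) := by
    have := Int.even_mul_succ_self (x-1)
    have hx : (x-1) * ((x-1)+1) = x*(x-1) := by ring
    rwa [hx] at this
  obtain ⟨c, hc⟩ := he
  rw [hc]
  omega

theorem tri_nonneg (x : Int) : 0 ≤ tri x := by
  have h := two_mul_tri x
  nlinarith [sq_nonneg (2*x - 1)]

theorem tri_succ (x : Int) : tri (x+1) = tri x + x := by
  have h1 := two_mul_tri (x+1)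
  have h2 := two_mul_tri x
  nlinarith

theorem tri_mono {a b : Int} (h0 : 0 ≤ a) (h : a ≤ b) : tri a ≤ tri b := by
  rcases eq_or_lt_of_le h0 with rfl | ha
  · have h1 := two_mul_tri 0
    have := tri_nonneg b
    omega
  · have h1 := two_mul_tri a
    have h2 := two_mul_tri b
    nlinarith [mul_nonneg (by omega : (0:Int) ≤ b - a) (by omega : (0:Int) ≤ b + a - 1)]

theorem sum_pyRange (x : Int) (hx : 0 ≤ x) :
    pySum (PySem.List.pyRange 0 x 1) = tri x := by
  obtain ⟨N, rfl⟩ := Int.eq_ofNat_of_zero_le hx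
  induction N with
  | zero =>
      simp [pySum, PySem.List.pyRange_one_eq_nil (by omega : (0:Int) ≤ 0)]
      have := two_mul_tri 0; omega
  | succ N ih =>
      have hsplit : PySem.List.pyRange 0 ((N:Int)+1) 1
          = PySem.List.pyRange 0 (N:Int) 1 ++ [(N:Int)] := by
        exact PySem.List.pyRange_one_succ_right (by omega)
      push_cast
      rw [hsplit]
      unfold pySum at *
      rw [List.foldl_append]
      have : tri ((N:Int)+1) = tri (N:Int) + N := tri_succ N
      simp [this, ih]

-- ---------- first-match search over a range ----------

theorem find?_pyRange_none (P : Int → Bool) (a b : Int)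
    (h : ∀ v : Int, a ≤ v → v < b → P v = false) :
    (PySem.List.pyRange a b 1).find? P = none := by
  rw [List.find?_eq_none]
  intro v hv
  rw [PySem.List.mem_pyRange_one] at hv
  simp [h v hv.1 hv.2]

theorem find?_pyRange_some (P : Int → Bool) (a b x : Int)
    (hax : a ≤ x) (hxb : x < b)
    (hbefore : ∀ v : Int, a ≤ v → v < x → P v = false) (hx : P x = true) :
    (PySem.List.pyRange a b 1).find? P = some x := by
  rw [PySem.List.pyRange_one_append a x b hax (le_of_lt hxb), List.find?_append,
      find?_pyRange_none P a x hbefore, Option.none_or,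
      PySem.List.pyRange_one_cons hxb]
  simp [hx]

-- ---------- a fold segment that leaves the state unchanged ----------

theorem foldl_const {σ : Type} (f : σ → Int → σ) (st : σ) :
    ∀ (l : List Int), (∀ i ∈ l, f st i = st) → l.foldl f st = st := by
  intro l
  induction l with
  | nil => intro _; rfl
  | cons x xs ih =>
      intro h
      simp only [List.foldl_cons, h x (by simp)]
      exact ih (fun i hi => h i (by simp [hi]))

-- ---------- the used array, viewed pointwise ----------

def UsedOK (n : Int) (U : List Bool) (f : Int → Bool) : Prop :=
  U.length = (n+1).toNat ∧ ∀ v : Int, 0 ≤ v → PySem.List.pyGetD U v false = f v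

theorem UsedOK_congr {n : Int} {U : List Bool} {f g : Int → Bool}
    (h : UsedOK n U f) (hfg : ∀ v : Int, 0 ≤ v → f v = g v) : UsedOK n U g :=
  ⟨h.1, fun v hv => (h.2 v hv).trans (hfg v hv)⟩

theorem UsedOK_init (n : Int) :
    UsedOK n (List.replicate (n+1).toNat false) (fun _ => false) := by
  refine ⟨by simp, fun v hv => ?_⟩
  rw [PySem.List.pyGetD_of_nonneg _ _ hv, List.getD_eq_getElem?_getD,
      List.getElem?_replicate]
  split <;> rfl

theorem UsedOK_set {n : Int} {U : List Bool} {f : Int → Bool}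
    (h : UsedOK n U f) (w : Int) (hw : 1 ≤ w) (hwn : w ≤ n) :
    UsedOK n (PySem.List.pySetD U w true) (fun v => if v = w then true else f v) := by
  constructor
  · rw [PySem.List.pySetD_of_nonneg _ _ (by omega : (0:Int) ≤ w)]
    simp [h.1]
  · intro v hv
    rw [PySem.List.pySetD_of_nonneg _ _ (by omega : (0:Int) ≤ w),
        PySem.List.pyGetD_of_nonneg _ _ hv, List.getD_eq_getElem?_getD,
        List.getElem?_set]
    have hval := h.2 v hv
    rw [PySem.List.pyGetD_of_nonneg _ _ hv, List.getD_eq_getElem?_getD] at hval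
    by_cases hvw : v = w
    · have hlt : w.toNat < U.length := by rw [h.1]; omega
      simp [hvw, hlt]
    · have hne : w.toNat ≠ v.toNat := by omega
      simp [hne, hvw, hval]

-- ---------- writing at the boundary between the filled prefix and the zero block ----------

theorem set_boundary {α : Type} (pre : List α) (z : Nat) (x v : α) :
    (pre ++ List.replicate (z+1) x).set pre.length v
      = (pre ++ [v]) ++ List.replicate z x := by
  rw [List.set_append]
  simp [List.replicate_succ]

-- ---------- the final fill loop ----------

theorem fill_nochange (res avail : List Int) (l : List Int)
    (h : ∀ i ∈ l, PySem.List.pyGetD res i 0 ≠ 0) :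
    l.foldl fillStep (res, avail) = (res, avail) :=
  foldl_const _ _ l (fun i hi => by simp [fillStep, h i hi])

theorem fill_phase2 : ∀ (avail pre : List Int),
    (PySem.List.pyRange (pre.length : Int) ((pre.length : Int) + avail.length) 1).foldl
        fillStep (pre ++ List.replicate avail.length (0:Int), avail)
      = (pre ++ avail, []) := by
  intro avail
  induction avail with
  | nil =>
      intro pre
      simp
  | cons a rest ih =>
      intro pre
      rw [PySem.List.pyRange_one_cons (by simp)]
      have hget : PySem.List.pyGetD (pre ++ List.replicate (a :: rest).length (0:Int))
          (pre.length : Int) 0 = 0 := by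
        rw [PySem.List.pyGetD_natCast, List.getD_eq_getElem?_getD,
            List.getElem?_append_right (le_refl _)]
        simp
      have hstep : fillStep (pre ++ List.replicate (a :: rest).length (0:Int), a :: rest)
          (pre.length : Int)
          = ((pre ++ [a]) ++ List.replicate rest.length (0:Int), rest) := by
        have h2 : PySem.List.pySetD (pre ++ List.replicate (a :: rest).length (0:Int))
            (pre.length : Int) a = (pre ++ [a]) ++ List.replicate rest.length 0 := by
          rw [PySem.List.pySetD_natCast]
          simp only [List.length_cons]
          exact set_boundary pre rest.length 0 a
        rw [fillStep, if_pos hget]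
        dsimp only
        rw [h2]

      simp only [List.foldl_cons, hstep]
      have hb : ((pre.length : Int) + 1) = (((pre ++ [a]).length : Nat) : Int) := by
        simp
      have hb2 : ((pre.length : Int) + ((a :: rest).length : Nat))
          = (((pre ++ [a]).length : Nat) : Int) + (rest.length : Nat) := by
        simp; omega
      rw [hb, hb2, ih (pre ++ [a])]
      simp

theorem fill_all (n : Int) (pre avail : List Int) (h0 : ∀ x ∈ pre, x ≠ 0)
    (hlen : (pre.length : Int) + avail.length = n) :
    (PySem.List.pyRange 0 n 1).foldl fillStep
        (pre ++ List.replicate avail.length 0, avail) = (pre ++ avail, []) := by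
  rw [PySem.List.pyRange_one_append 0 (pre.length) n (by positivity) (by omega),
      List.foldl_append]
  have h1 : (PySem.List.pyRange 0 (pre.length) 1).foldl fillStep
      (pre ++ List.replicate avail.length 0, avail)
      = (pre ++ List.replicate avail.length 0, avail) := by
    apply fill_nochange
    intro i hi
    rw [PySem.List.mem_pyRange_one] at hi
    rw [PySem.List.pyGetD_of_nonneg _ _ hi.1, List.getD_eq_getElem?_getD]
    have hlt : i.toNat < pre.length := by omega
    rw [List.getElem?_append_left hlt]
    simp only [List.getElem?_eq_getElem hlt, Option.getD_some]
    exact h0 _ (List.getElem_mem hlt)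
  rw [h1]
  have := fill_phase2 avail pre
  rw [show ((pre.length : Int) + (avail.length : Nat)) = n from hlen] at this
  exact this

-- ---------- one outer-loop step of the greedy ----------

theorem step_places (n : Int) (R : List Int) (U : List Bool) (f : Int → Bool)
    (rem pos v0 : Int)
    (hU : UsedOK n U f)
    (_hpos0 : 0 ≤ pos) (hposn : pos < n)
    (hv01 : 1 ≤ v0) (hv0n : v0 ≤ n)
    (hfv0 : f v0 = false)
    (hc1 : max 0 (v0 - (pos+1)) ≤ rem)
    (hc2 : rem - max 0 (v0 - (pos+1)) ≤ tri (n - pos - 1))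
    (hprev : ∀ v : Int, 1 ≤ v → v < v0 →
        f v = true ∨ ¬(max 0 (v - (pos+1)) ≤ rem ∧ rem - max 0 (v - (pos+1)) ≤ tri (n - pos - 1))) :
    provenStep n (R, U, rem) pos
      = (PySem.List.pySetD R pos v0, PySem.List.pySetD U v0 true,
         rem - max 0 (v0 - (pos+1))) := by
  have hsum : pySum (PySem.List.pyRange 0 (n-pos-1) 1) = tri (n-pos-1) :=
    sum_pyRange _ (by omega)
  have hfind : (PySem.List.pyRange 1 (n+1) 1).find? (fun val =>
      (!(PySem.List.pyGetD U val false))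
      && decide (max 0 (val - (pos+1)) ≤ rem)
      && decide (rem - max 0 (val - (pos+1)) ≤ pySum (PySem.List.pyRange 0 (n-pos-1) 1)))
      = some v0 := by
    apply find?_pyRange_some _ _ _ _ hv01 (by omega)
    · intro v hv1 hvv0
      rw [hsum, hU.2 v (by omega)]
      rcases hprev v hv1 hvv0 with h | h
      · simp [h]
      · by_cases hc : max 0 (v - (pos+1)) ≤ rem
        · have hc2' : ¬(rem - max 0 (v - (pos+1)) ≤ tri (n - pos - 1)) :=
            fun hh => h ⟨hc, hh⟩
          simp [hc, hc2']
        · simp [hc]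
    · rw [hsum, hU.2 v0 (by omega), hfv0]
      simp [hc1, hc2]
  simp only [provenStep, hfind]

theorem step_none (n : Int) (R : List Int) (U : List Bool) (f : Int → Bool)
    (rem pos : Int)
    (hU : UsedOK n U f)
    (_hpos0 : 0 ≤ pos) (hposn : pos < n)
    (hall : ∀ v : Int, 1 ≤ v → v ≤ n →
        f v = true ∨ ¬(max 0 (v - (pos+1)) ≤ rem ∧ rem - max 0 (v - (pos+1)) ≤ tri (n - pos - 1))) :
    provenStep n (R, U, rem) pos = (R, U, rem) := by
  have hsum : pySum (PySem.List.pyRange 0 (n-pos-1) 1) = tri (n-pos-1) :=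
    sum_pyRange _ (by omega)
  have hfind : (PySem.List.pyRange 1 (n+1) 1).find? (fun val =>
      (!(PySem.List.pyGetD U val false))
      && decide (max 0 (val - (pos+1)) ≤ rem)
      && decide (rem - max 0 (val - (pos+1)) ≤ pySum (PySem.List.pyRange 0 (n-pos-1) 1)))
      = none := by
    apply find?_pyRange_none
    intro v hv1 hvn
    rw [hsum, hU.2 v (by omega)]
    rcases hall v hv1 (by omega) with h | h
    · simp [h]
    · by_cases hc : max 0 (v - (pos+1)) ≤ rem
      · have hc2' : ¬(rem - max 0 (v - (pos+1)) ≤ tri (n - pos - 1)) :=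
          fun hh => h ⟨hc, hh⟩
        simp [hc, hc2']
      · simp [hc]
  simp only [provenStep, hfind]

-- ---------- phase 1: the identity prefix ----------

theorem set_boundary2 {α : Type} (pre post : List α) (c z : Nat) (x v : α)
    (hlen : pre.length = c) (hpost : post = List.replicate (z+1) x) :
    (pre ++ post).set c v = (pre ++ [v]) ++ List.replicate z x := by
  subst hlen hpost
  exact set_boundary pre z x v

theorem phase1 (n k : Int) (hk : 1 ≤ k) :
    ∀ (j c : Nat) (U : List Bool),
    UsedOK n U (fun v => decide (1 ≤ v ∧ v ≤ (c:Int))) →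
    ((c:Int) + (j:Int) ≤ n) →
    (∀ i : Int, (c:Int) ≤ i → i < (c:Int) + (j:Int) → k ≤ tri (n - i - 1)) →
    ∃ U', (PySem.List.pyRange (c:Int) ((c:Int)+(j:Int)) 1).foldl (provenStep n)
        (PySem.List.pyRange 1 ((c:Int)+1) 1 ++ List.replicate (n.toNat - c) 0, U, k)
      = (PySem.List.pyRange 1 ((c:Int)+(j:Int)+1) 1
          ++ List.replicate (n.toNat - c - j) 0, U', k)
      ∧ UsedOK n U' (fun v => decide (1 ≤ v ∧ v ≤ (c:Int)+(j:Int))) := by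
  intro j
  induction j with
  | zero =>
      intro c U hU _ _
      refine ⟨U, ?_, ?_⟩
      · have hnil : PySem.List.pyRange (c:Int) ((c:Int)+((0:Nat):Int)) 1 = [] :=
          PySem.List.pyRange_one_eq_nil (by push_cast; omega)
        rw [hnil]
        simp
      · exact UsedOK_congr hU (by intro v hv; norm_num)
  | succ j ih =>
      intro c U hU hcj hcond
      have hcj' : (c:Int) + (j:Int) + 1 ≤ n := by push_cast at hcj; omega
      have hcn : (c:Int) < n := by omega
      rw [PySem.List.pyRange_one_cons (a := (c:Int)) (b := (c:Int)+((j+1:Nat):Int))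
        (by push_cast; omega)]
      simp only [List.foldl_cons]
      have hstep := step_places n
        (PySem.List.pyRange 1 ((c:Int)+1) 1 ++ List.replicate (n.toNat - c) 0) U
        (fun v => decide (1 ≤ v ∧ v ≤ (c:Int))) k (c:Int) ((c:Int)+1) hU
        (by omega) hcn (by omega) (by omega)
        (by simp)
        (by simp; omega)
        (by simpa using hcond (c:Int) (le_refl _) (by push_cast; omega))
        (by intro v hv1 hvc; left; simp; omega)
      rw [hstep]
      have hsetR : PySem.List.pySetD
          (PySem.List.pyRange 1 ((c:Int)+1) 1 ++ List.replicate (n.toNat - c) 0)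
          (c:Int) ((c:Int)+1)
          = PySem.List.pyRange 1 ((c:Int)+1+1) 1
            ++ List.replicate (n.toNat - (c+1)) 0 := by
        rw [PySem.List.pySetD_natCast,
            set_boundary2 _ _ c (n.toNat - (c+1)) 0 _
              (by rw [PySem.List.length_pyRange_one]; omega)
              (by rw [show n.toNat - (c+1) + 1 = n.toNat - c by omega]),
            ← PySem.List.pyRange_one_succ_right (by omega : (1:Int) ≤ (c:Int)+1)]
      have hrem : k - max 0 ((c:Int)+1 - ((c:Int)+1)) = k := by simp
      rw [hsetR, hrem]
      have hU' := UsedOK_set hU ((c:Int)+1) (by omega) (by omega)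
      have hU'' : UsedOK n (PySem.List.pySetD U ((c:Int)+1) true)
          (fun v => decide (1 ≤ v ∧ v ≤ ((c+1:Nat):Int))) := by
        refine UsedOK_congr hU' ?_
        intro v hv
        push_cast
        by_cases h : v = (c:Int)+1
        · rw [if_pos h]
          symm
          rw [decide_eq_true_iff]
          omega
        · rw [if_neg h, decide_eq_decide]
          omega
      obtain ⟨U', hfold, hUf⟩ := ih (c+1) (PySem.List.pySetD U ((c:Int)+1) true) hU''
        (by push_cast; omega)
        (by intro i h1 h2
            push_cast at h1 h2
            exact hcond i (by omega) (by push_cast; omega))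
      push_cast at hfold
      rw [show (c:Int) + ((j+1:Nat):Int) = (c:Int)+1+(j:Int) by push_cast; ring]
      rw [show (c:Int)+1+(j:Int)+1 = (c:Int)+1+((j:Int)+1) by ring] at hfold ⊢
      rw [show n.toNat - c - (j+1) = n.toNat - (c+1) - j by omega]
      refine ⟨U', ?_, ?_⟩
      · exact hfold
      · refine UsedOK_congr hUf ?_
        intro v hv
        rw [decide_eq_decide]
        push_cast
        omega

-- ---------- a tail of positions where the greedy places nothing ----------

theorem tail_none (n rem : Int) (R : List Int) (U : List Bool) (f : Int → Bool)
    (hU : UsedOK n U f) (q : Int) (hq : 0 ≤ q)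
    (hnone : ∀ pos v : Int, q ≤ pos → pos < n → 1 ≤ v → v ≤ n →
        f v = true ∨ ¬(max 0 (v - (pos+1)) ≤ rem ∧
                        rem - max 0 (v - (pos+1)) ≤ tri (n - pos - 1))) :
    (PySem.List.pyRange q n 1).foldl (provenStep n) (R, U, rem) = (R, U, rem) := by
  apply foldl_const
  intro pos hpos
  rw [PySem.List.mem_pyRange_one] at hpos
  exact step_none n R U f rem pos hU (by omega) hpos.2
    (fun v hv1 hvn => hnone pos v hpos.1 hpos.2 hv1 hvn)

-- ---------- the available list, from the pointwise description of used ----------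

theorem avail_eq (n : Int) (U : List Bool) (f : Int → Bool) (hU : UsedOK n U f) :
    (PySem.List.pyRange 1 (n+1) 1).filter (fun v => !(PySem.List.pyGetD U v false))
      = (PySem.List.pyRange 1 (n+1) 1).filter (fun v => !(f v)) := by
  apply List.filter_congr
  intro v hv
  rw [PySem.List.mem_pyRange_one] at hv
  rw [hU.2 v (by omega)]

theorem filter_range_none (P : Int → Bool) (a b : Int)
    (h : ∀ v : Int, a ≤ v → v < b → P v = false) :
    (PySem.List.pyRange a b 1).filter P = [] := by
  rw [List.filter_eq_nil_iff]
  intro v hv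
  rw [PySem.List.mem_pyRange_one] at hv
  simp [h v hv.1 hv.2]

theorem filter_range_all (P : Int → Bool) (a b : Int)
    (h : ∀ v : Int, a ≤ v → v < b → P v = true) :
    (PySem.List.pyRange a b 1).filter P = PySem.List.pyRange a b 1 := by
  rw [List.filter_eq_self]
  intro v hv
  rw [PySem.List.mem_pyRange_one] at hv
  exact h v hv.1 hv.2

-- tri of small arguments
theorem tri_zero : tri 0 = 0 := by have := two_mul_tri 0; omega
theorem tri_one : tri 1 = 0 := by have := two_mul_tri 1; omega
theorem tri_two : tri 2 = 1 := by have := two_mul_tri 2; omega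

-- ---------- the main characterization of construct_proven on 1 <= k <= tri n ----------

theorem proven_main (n k t : Int) (hn : 2 ≤ n) (hk : 1 ≤ k)
    (ht2 : 2 ≤ t) (htn : t ≤ n) (hlo : tri (t-1) < k) (hhi : k ≤ tri t) :
    construct_proven n k = some (
      if k - tri (t-1) = t - 1 then
        PySem.List.pyRange 1 (n-(t-1)) 1 ++ [n] ++ PySem.List.pyRange (n-(t-1)) n 1
      else
        PySem.List.pyRange 1 (n-(t-1)) 1 ++ [n-(t-1) + (k - tri (t-1))] ++ [n]
          ++ (PySem.List.pyRange (n-(t-1)) n 1).filter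
              (fun v => decide (v ≠ n-(t-1) + (k - tri (t-1))))) := by
  have hTnn : 0 ≤ tri (t-1) := tri_nonneg _
  have htm : tri t = tri (t-1) + (t-1) := by
    have := tri_succ (t-1)
    simpa using this
  -- abbreviations
  set m : Int := t - 1 with hm
  set p : Int := n - m with hp
  set d : Int := k - tri m with hd
  have hm1 : 1 ≤ m := by omega
  have hmn : m ≤ n - 1 := by omega
  have hp1 : 1 ≤ p := by omega
  have hpn : p ≤ n - 1 := by omega
  have hd1 : 1 ≤ d := by
    have : tri m < k := hlo
    omega
  have hdm : d ≤ m := by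
    have : k ≤ tri m + m := by rw [← htm]; exact hhi
    omega
  have hkd : k = tri m + d := by omega
  -- unfold construct_proven, discharge the two leading branches
  have hktri : k ≤ tri n := le_trans hhi (tri_mono (by omega) htn)
  unfold construct_proven
  rw [if_neg (by omega : ¬ k = 0)]
  rw [show PySem.Int.floordiv (n*(n-1)) 2 = tri n from rfl]
  rw [if_neg (by omega : ¬ k > tri n)]
  dsimp only
  -- phase 1 : positions 0 .. p-2 place the identity prefix
  have hU0 : UsedOK n (List.replicate (n+1).toNat false)
      (fun v => decide (1 ≤ v ∧ v ≤ ((0:Nat):Int))) := by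
    refine UsedOK_congr (UsedOK_init n) ?_
    intro v hv
    symm
    simp only [decide_eq_false_iff_not]
    omega
  obtain ⟨U1, hfold1, hU1⟩ := phase1 n k hk (p-1).toNat 0 (List.replicate (n+1).toNat false)
    hU0
    (by rw [Int.toNat_of_nonneg (show (0:Int) ≤ p-1 by omega)]; omega)
    (by intro i h1 h2
        rw [Int.toNat_of_nonneg (show (0:Int) ≤ p-1 by omega)] at h2
        exact le_trans hhi (tri_mono (by omega) (by omega)))
  rw [Int.toNat_of_nonneg (by omega : (0:Int) ≤ p-1)] at hfold1 hU1
  simp only [Nat.cast_zero, zero_add, Nat.sub_zero] at hfold1 hU1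
  have hU1' : UsedOK n U1 (fun v => decide (1 ≤ v ∧ v ≤ p - 1)) :=
    UsedOK_congr hU1 (by intro v hv; rw [decide_eq_decide]; try omega)
  rw [PySem.List.pyRange_one_eq_nil (by omega : (1:Int) ≤ 1),
      show p - 1 + 1 = p by ring] at hfold1
  simp only [List.nil_append] at hfold1
  -- the jump step at position p-1
  have hjump := step_places n
    (PySem.List.pyRange 1 p 1 ++ List.replicate (n.toNat - (p-1).toNat) 0) U1
    (fun v => decide (1 ≤ v ∧ v ≤ p - 1)) k (p-1) (p+d) hU1'
    (by omega) (by omega) (by omega) (by omega)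
    (by simp only [decide_eq_false_iff_not]; omega)
    (by rw [show p+d-((p-1)+1) = d by ring, max_eq_right (by omega)]; linarith)
    (by rw [show p+d-((p-1)+1) = d by ring, max_eq_right (by omega),
            show n-(p-1)-1 = m by ring]; linarith)
    (by intro v hv1 hvlt
        by_cases hvp : v ≤ p - 1
        · left; simp only [decide_eq_true_iff]; omega
        · right
          rintro ⟨h1, h2⟩
          rw [show v-((p-1)+1) = v-p by ring, max_eq_right (by omega),
              show n-(p-1)-1 = m by ring] at h2
          have : 0 ≤ tri m := tri_nonneg m
          omega)
  have hsetR2 : PySem.List.pySetD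
      (PySem.List.pyRange 1 p 1 ++ List.replicate (n.toNat - (p-1).toNat) 0)
      (p-1) (p+d)
      = (PySem.List.pyRange 1 p 1 ++ [p+d]) ++ List.replicate (n.toNat - p.toNat) 0 := by
    rw [PySem.List.pySetD_of_nonneg _ _ (by omega : (0:Int) ≤ p-1),
        set_boundary2 _ _ (p-1).toNat (n.toNat - p.toNat) 0 _
          (by rw [PySem.List.length_pyRange_one]; try omega)
          (by rw [show n.toNat - p.toNat + 1 = n.toNat - (p-1).toNat by omega])]
  have hrem2 : k - max 0 (p+d-((p-1)+1)) = tri m := by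
    rw [show p+d-((p-1)+1) = d by ring, max_eq_right (by omega)]
    omega
  have hU2 : UsedOK n (PySem.List.pySetD U1 (p+d) true)
      (fun v => decide ((1 ≤ v ∧ v ≤ p - 1) ∨ v = p + d)) := by
    refine UsedOK_congr (UsedOK_set hU1' (p+d) (by omega) (by omega)) ?_
    intro v hv
    by_cases h : v = p + d
    · rw [if_pos h]
      symm
      rw [decide_eq_true_iff]
      omega
    · rw [if_neg h, decide_eq_decide]
      omega
  -- assemble the greedy fold over positions p-1 .. n-1, by cases on the shape
  have hsplit : PySem.List.pyRange 0 n 1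
      = PySem.List.pyRange 0 (p-1) 1 ++ ((p-1) :: PySem.List.pyRange p n 1) := by
    rw [PySem.List.pyRange_one_append 0 (p-1) n (by omega) (by omega),
        PySem.List.pyRange_one_cons (by omega : p-1 < n), show p-1+1 = p by ring]
  set Rmid : List Int := (PySem.List.pyRange 1 p 1 ++ [p+d])
      ++ List.replicate (n.toNat - p.toNat) 0 with hRmid
  have hst0 : (PySem.List.pyRange 0 n 1).foldl (provenStep n)
      (List.replicate n.toNat 0, List.replicate (n+1).toNat false, k)
      = (PySem.List.pyRange p n 1).foldl (provenStep n)
          (Rmid, PySem.List.pySetD U1 (p+d) true, tri m) := by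
    rw [hsplit, List.foldl_append, hfold1]
    simp only [List.foldl_cons]
    rw [hjump, hsetR2, hrem2]
  by_cases hdm' : d = m
  · -- jump value is n itself
    have hpd : p + d = n := by omega
    by_cases hm2 : 2 ≤ m
    · -- nothing more is placed; the fill pass adds p..n-1 in order
      have htail : (PySem.List.pyRange p n 1).foldl (provenStep n)
          (Rmid, PySem.List.pySetD U1 (p+d) true, tri m)
          = (Rmid, PySem.List.pySetD U1 (p+d) true, tri m) := by
        apply tail_none n (tri m) _ _ _ hU2 p (by omega)
        intro pos v hpos1 hpos2 hv1 hvn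
        by_cases hcase : (1 ≤ v ∧ v ≤ p - 1) ∨ v = p + d
        · left; simp only [decide_eq_true_iff]; exact hcase
        · right
          rintro ⟨h1, h2⟩
          have hvp : p ≤ v := by omega
          have hvlt : v ≤ n - 1 := by omega
          have hmono : tri (n-pos-1) + (n-pos-1) ≤ tri m := by
            have ha := tri_succ (n - pos - 1)
            have hb := tri_mono (show (0:Int) ≤ n-pos-1+1 by omega)
              (show n-pos-1+1 ≤ m by omega)
            linarith
          rcases (show n-pos-1 = 0 ∨ 1 ≤ n-pos-1 by omega) with hr | hr
          · rw [max_eq_left (by omega), hr, tri_zero] at h2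
            have h3 := tri_mono (show (0:Int) ≤ 2 by omega) (show (2:Int) ≤ m by omega)
            have h4 := tri_two
            linarith
          · have hmax2 : max 0 (v-(pos+1)) ≤ n - pos - 2 := by
              apply max_le (by omega) (by omega)
            linarith
      rw [hst0, htail]
      have havail : (PySem.List.pyRange 1 (n+1) 1).filter
          (fun v => !(PySem.List.pyGetD (PySem.List.pySetD U1 (p+d) true) v false))
          = PySem.List.pyRange p n 1 := by
        rw [avail_eq n _ _ hU2,
            PySem.List.pyRange_one_append 1 p (n+1) (by omega) (by omega),
            PySem.List.pyRange_one_append p n (n+1) (by omega) (by omega),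
            List.filter_append, List.filter_append,
            filter_range_none _ 1 p
              (by intro v h1 h2
                  simp only [Bool.not_eq_false', decide_eq_true_iff]
                  left; omega),
            filter_range_all _ p n
              (by intro v h1 h2
                  simp only [Bool.not_eq_true', decide_eq_false_iff_not]
                  omega),
            filter_range_none _ n (n+1)
              (by intro v h1 h2
                  simp only [Bool.not_eq_false', decide_eq_true_iff]
                  right; omega)]
        simp
      simp only []
      rw [havail]
      have hzer : n.toNat - p.toNat = (PySem.List.pyRange p n 1).length := by
        rw [PySem.List.length_pyRange_one]; omega
      have hfill := fill_all n (PySem.List.pyRange 1 p 1 ++ [p+d])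
          (PySem.List.pyRange p n 1)
          (by intro x hx
              rcases List.mem_append.mp hx with h | h
              · rw [PySem.List.mem_pyRange_one] at h; omega
              · rw [List.mem_singleton] at h; omega)
          (by simp only [List.length_append, PySem.List.length_pyRange_one,
                List.length_singleton]
              push_cast
              omega)
      rw [hRmid, hzer, hfill]
      rw [if_pos hdm']
      simp [List.append_assoc, hpd]
    · -- m = 1 : the very last position is filled inside the loop (with value p)
      have hm1' : m = 1 := by omega
      have hd1' : d = 1 := by omega
      have hnp : n = p + 1 := by omega
      have htm0 : tri m = 0 := by rw [hm1']; exact tri_one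
      have hsingle : PySem.List.pyRange p n 1 = [p] := by
        rw [hnp]
        exact PySem.List.pyRange_one_singleton p
      have hstep2 := step_places n Rmid (PySem.List.pySetD U1 (p+d) true)
          (fun v => decide ((1 ≤ v ∧ v ≤ p - 1) ∨ v = p + d)) (tri m) p p hU2
          (by omega) (by omega) (by omega) (by omega)
          (by simp only [decide_eq_false_iff_not]; omega)
          (by rw [max_eq_left (by omega)]; omega)
          (by rw [max_eq_left (by omega), show n-p-1 = 0 by omega, tri_zero]; omega)
          (by intro v hv1 hvlt; left; simp only [decide_eq_true_iff]; omega)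
      have hsetR3 : PySem.List.pySetD Rmid p p
          = ((PySem.List.pyRange 1 p 1 ++ [p+d]) ++ [p]) ++ List.replicate 0 (0:Int) := by
        show PySem.List.pySetD ((PySem.List.pyRange 1 p 1 ++ [p+d])
          ++ List.replicate (n.toNat - p.toNat) 0) p p = _
        rw [PySem.List.pySetD_of_nonneg _ _ (by omega : (0:Int) ≤ p),
            set_boundary2 _ _ p.toNat 0 0 _
              (by simp only [List.length_append, PySem.List.length_pyRange_one,
                    List.length_singleton]; omega)
              (by rw [show (0:Nat) + 1 = n.toNat - p.toNat by omega])]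
      have hU3 : UsedOK n (PySem.List.pySetD (PySem.List.pySetD U1 (p+d) true) p true)
          (fun v => decide (((1 ≤ v ∧ v ≤ p - 1) ∨ v = p + d) ∨ v = p)) := by
        refine UsedOK_congr (UsedOK_set hU2 p (by omega) (by omega)) ?_
        intro v hv
        by_cases h : v = p
        · rw [if_pos h]; symm; rw [decide_eq_true_iff]; omega
        · rw [if_neg h, decide_eq_decide]; omega
      rw [hst0, hsingle]
      simp only [List.foldl_cons, List.foldl_nil]
      rw [hstep2, hsetR3]
      have havail : (PySem.List.pyRange 1 (n+1) 1).filter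
          (fun v => !(PySem.List.pyGetD
            (PySem.List.pySetD (PySem.List.pySetD U1 (p+d) true) p true) v false))
          = ([] : List Int) := by
        rw [avail_eq n _ _ hU3]
        apply filter_range_none
        intro v h1 h2
        simp only [Bool.not_eq_false', decide_eq_true_iff]
        omega
      simp only []
      rw [havail]
      have hfill := fill_all n ((PySem.List.pyRange 1 p 1 ++ [p+d]) ++ [p]) []
          (by intro x hx
              rcases List.mem_append.mp hx with h | h
              · rcases List.mem_append.mp h with h' | h'
                · rw [PySem.List.mem_pyRange_one] at h'; omega
                · rw [List.mem_singleton] at h'; omega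
              · rw [List.mem_singleton] at h; omega)
          (by simp only [List.length_append, PySem.List.length_pyRange_one,
                List.length_singleton, List.length_nil]
              push_cast
              omega)
      simp only [List.length_nil] at hfill
      rw [hfill]
      rw [if_pos hdm']
      simp [List.append_assoc, show p + d = n by omega]
  · -- d < m : n is placed right after the jump
    have hdm2 : d ≤ m - 1 := by omega
    have hm2 : 2 ≤ m := by omega
    have hstep3 := step_places n Rmid (PySem.List.pySetD U1 (p+d) true)
        (fun v => decide ((1 ≤ v ∧ v ≤ p - 1) ∨ v = p + d)) (tri m) p n hU2
        (by omega) (by omega) (by omega) (by omega)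
        (by simp only [decide_eq_false_iff_not]; omega)
        (by rw [show n-(p+1) = m-1 by omega, max_eq_right (by omega)]
            nlinarith [two_mul_tri m,
              mul_nonneg (show (0:Int) ≤ m-2 by omega) (show (0:Int) ≤ m-1 by omega)])
        (by rw [show n-(p+1) = m-1 by omega, max_eq_right (by omega),
                show n-p-1 = m-1 by omega]
            have hts := tri_succ (m-1)
            rw [show m-1+1 = m by ring] at hts
            linarith)
        (by intro v hv1 hvlt
            by_cases hcase : (1 ≤ v ∧ v ≤ p - 1) ∨ v = p + d
            · left; simp only [decide_eq_true_iff]; exact hcase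
            · right
              rintro ⟨h1, h2⟩
              rw [show n-p-1 = m-1 by omega] at h2
              have hmax : max 0 (v-(p+1)) ≤ m-2 := max_le (by omega) (by omega)
              have hts := tri_succ (m-1)
              rw [show m-1+1 = m by ring] at hts
              linarith)
    have hsetR3 : PySem.List.pySetD Rmid p n
        = ((PySem.List.pyRange 1 p 1 ++ [p+d]) ++ [n])
          ++ List.replicate (n.toNat - p.toNat - 1) 0 := by
      rw [hRmid,
          PySem.List.pySetD_of_nonneg _ _ (by omega : (0:Int) ≤ p),
          set_boundary2 _ _ p.toNat (n.toNat - p.toNat - 1) 0 _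
            (by simp only [List.length_append, PySem.List.length_pyRange_one,
                  List.length_singleton]; omega)
            (by rw [show n.toNat - p.toNat - 1 + 1 = n.toNat - p.toNat by omega])]
    have hrem3 : tri m - max 0 (n-(p+1)) = tri (m-1) := by
      rw [show n-(p+1) = m-1 by omega, max_eq_right (by omega)]
      have hts := tri_succ (m-1)
      rw [show m-1+1 = m by ring] at hts
      linarith
    have hU3 : UsedOK n (PySem.List.pySetD (PySem.List.pySetD U1 (p+d) true) n true)
        (fun v => decide ((1 ≤ v ∧ v ≤ p - 1) ∨ v = p + d ∨ v = n)) := by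
      refine UsedOK_congr (UsedOK_set hU2 n (by omega) (by omega)) ?_
      intro v hv
      by_cases h : v = n
      · rw [if_pos h]; symm; rw [decide_eq_true_iff]; omega
      · rw [if_neg h, decide_eq_decide]; omega
    by_cases hm3 : 3 ≤ m
    · -- general case: nothing is placed after position p
      have hrest : (PySem.List.pyRange p n 1).foldl (provenStep n)
          (Rmid, PySem.List.pySetD U1 (p+d) true, tri m)
          = (((PySem.List.pyRange 1 p 1 ++ [p+d]) ++ [n])
              ++ List.replicate (n.toNat - p.toNat - 1) 0,
             PySem.List.pySetD (PySem.List.pySetD U1 (p+d) true) n true, tri (m-1)) := by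
        rw [PySem.List.pyRange_one_cons (by omega : p < n)]
        simp only [List.foldl_cons]
        rw [hstep3, hsetR3, hrem3]
        apply tail_none n (tri (m-1)) _ _ _ hU3 (p+1) (by omega)
        intro pos v hpos1 hpos2 hv1 hvn
        by_cases hcase : (1 ≤ v ∧ v ≤ p - 1) ∨ v = p + d ∨ v = n
        · left; simp only [decide_eq_true_iff]; exact hcase
        · right
          rintro ⟨h1, h2⟩
          have hmono : tri (n-pos-1) + (n-pos-1) ≤ tri (m-1) := by
            have ha := tri_succ (n - pos - 1)
            have hb := tri_mono (show (0:Int) ≤ n-pos-1+1 by omega)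
              (show n-pos-1+1 ≤ m-1 by omega)
            linarith
          rcases (show n-pos-1 = 0 ∨ 1 ≤ n-pos-1 by omega) with hr | hr
          · rw [max_eq_left (by omega), hr, tri_zero] at h2
            have h3 := tri_mono (show (0:Int) ≤ 2 by omega) (show (2:Int) ≤ m-1 by omega)
            have h4 := tri_two
            linarith
          · have hmax2 : max 0 (v-(pos+1)) ≤ n - pos - 2 :=
              max_le (by omega) (by omega)
            linarith
      rw [hst0, hrest]
      have havail : (PySem.List.pyRange 1 (n+1) 1).filter
          (fun v => !(PySem.List.pyGetD
            (PySem.List.pySetD (PySem.List.pySetD U1 (p+d) true) n true) v false))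
          = (PySem.List.pyRange p n 1).filter (fun v => decide (v ≠ p + d)) := by
        rw [avail_eq n _ _ hU3,
            PySem.List.pyRange_one_append 1 p (n+1) (by omega) (by omega),
            PySem.List.pyRange_one_append p n (n+1) (by omega) (by omega),
            List.filter_append, List.filter_append,
            filter_range_none _ 1 p
              (by intro v h1 h2
                  simp only [Bool.not_eq_false', decide_eq_true_iff]
                  left; omega),
            filter_range_none _ n (n+1)
              (by intro v h1 h2
                  simp only [Bool.not_eq_false', decide_eq_true_iff]
                  right; right; omega),
            List.filter_congr (l := PySem.List.pyRange p n 1)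
              (q := fun v => decide (v ≠ p + d))
              (by intro v hv
                  rw [PySem.List.mem_pyRange_one] at hv
                  simp only [ne_eq, decide_not]
                  congr 1
                  rw [decide_eq_decide]
                  omega)]
        simp
      simp only []
      rw [havail]
      have hlenav : ((PySem.List.pyRange p n 1).filter
          (fun v => decide (v ≠ p + d))).length = n.toNat - p.toNat - 1 := by
        have hsp : (PySem.List.pyRange p n 1).filter (fun v => decide (v ≠ p + d))
            = PySem.List.pyRange p (p+d) 1 ++ PySem.List.pyRange (p+d+1) n 1 := by
          rw [PySem.List.pyRange_one_append p (p+d) n (by omega) (by omega),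
              List.filter_append,
              PySem.List.pyRange_one_cons (by omega : p+d < n),
              List.filter_cons]
          rw [show (decide (p+d ≠ p+d)) = false by simp]
          rw [filter_range_all _ p (p+d)
                (by intro v h1 h2; simp only [decide_eq_true_iff]; omega),
              filter_range_all _ (p+d+1) n
                (by intro v h1 h2; simp only [decide_eq_true_iff]; omega)]
          simp
        rw [hsp, List.length_append, PySem.List.length_pyRange_one,
            PySem.List.length_pyRange_one]
        omega
      have hfill := fill_all n ((PySem.List.pyRange 1 p 1 ++ [p+d]) ++ [n])
          ((PySem.List.pyRange p n 1).filter (fun v => decide (v ≠ p + d)))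
          (by intro x hx
              rcases List.mem_append.mp hx with h | h
              · rcases List.mem_append.mp h with h' | h'
                · rw [PySem.List.mem_pyRange_one] at h'; omega
                · rw [List.mem_singleton] at h'; omega
              · rw [List.mem_singleton] at h; omega)
          (by simp only [List.length_append, PySem.List.length_pyRange_one,
                List.length_singleton, hlenav]
              try push_cast
              try omega)
      rw [hlenav] at hfill
      rw [hfill, if_neg hdm']
      try simp [List.append_assoc]
    · -- m = 2, d = 1 : the loop also places p at the final position
      have hm2' : m = 2 := by omega
      have hd1' : d = 1 := by omega
      have hnp2 : n = p + 2 := by omega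
      have htm1 : tri (m-1) = 0 := by rw [show m-1 = 1 by omega]; exact tri_one
      have hstep4 := step_places n
          (((PySem.List.pyRange 1 p 1 ++ [p+d]) ++ [n])
            ++ List.replicate (n.toNat - p.toNat - 1) 0)
          (PySem.List.pySetD (PySem.List.pySetD U1 (p+d) true) n true)
          (fun v => decide ((1 ≤ v ∧ v ≤ p - 1) ∨ v = p + d ∨ v = n)) (tri (m-1))
          (p+1) p hU3
          (by omega) (by omega) (by omega) (by omega)
          (by simp only [decide_eq_false_iff_not]; omega)
          (by rw [max_eq_left (by omega)]; exact tri_nonneg _)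
          (by rw [max_eq_left (by omega), show n-(p+1)-1 = 0 by omega, tri_zero, htm1]
              omega)
          (by intro v hv1 hvlt; left; simp only [decide_eq_true_iff]; omega)
      have hsetR4 : PySem.List.pySetD
          (((PySem.List.pyRange 1 p 1 ++ [p+d]) ++ [n])
            ++ List.replicate (n.toNat - p.toNat - 1) 0) (p+1) p
          = ((((PySem.List.pyRange 1 p 1 ++ [p+d]) ++ [n]) ++ [p])
              ++ List.replicate 0 (0:Int)) := by
        rw [PySem.List.pySetD_of_nonneg _ _ (by omega : (0:Int) ≤ p+1),
            set_boundary2 _ _ (p+1).toNat 0 0 _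
              (by simp only [List.length_append, PySem.List.length_pyRange_one,
                    List.length_singleton]; omega)
              (by rw [show (0:Nat) + 1 = n.toNat - p.toNat - 1 by omega])]
      have hU4 : UsedOK n
          (PySem.List.pySetD
            (PySem.List.pySetD (PySem.List.pySetD U1 (p+d) true) n true) p true)
          (fun v => decide (((1 ≤ v ∧ v ≤ p - 1) ∨ v = p + d ∨ v = n) ∨ v = p)) := by
        refine UsedOK_congr (UsedOK_set hU3 p (by omega) (by omega)) ?_
        intro v hv
        by_cases h : v = p
        · rw [if_pos h]; symm; rw [decide_eq_true_iff]; omega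
        · rw [if_neg h, decide_eq_decide]; omega
      have hrest : (PySem.List.pyRange p n 1).foldl (provenStep n)
          (Rmid, PySem.List.pySetD U1 (p+d) true, tri m)
          = ((((PySem.List.pyRange 1 p 1 ++ [p+d]) ++ [n]) ++ [p])
              ++ List.replicate 0 (0:Int),
             PySem.List.pySetD
              (PySem.List.pySetD (PySem.List.pySetD U1 (p+d) true) n true) p true,
             tri (m-1) - max 0 (p - ((p+1)+1))) := by
        rw [PySem.List.pyRange_one_cons (by omega : p < n),
            show PySem.List.pyRange (p+1) n 1 = [p+1] by
              rw [hnp2, show p+2 = (p+1)+1 by ring]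
              exact PySem.List.pyRange_one_singleton (p+1)]
        simp only [List.foldl_cons, List.foldl_nil]
        rw [hstep3, hsetR3, hrem3, hstep4, hsetR4]
      rw [hst0, hrest]
      have havail : (PySem.List.pyRange 1 (n+1) 1).filter
          (fun v => !(PySem.List.pyGetD
            (PySem.List.pySetD
              (PySem.List.pySetD (PySem.List.pySetD U1 (p+d) true) n true) p true)
            v false))
          = ([] : List Int) := by
        rw [avail_eq n _ _ hU4]
        apply filter_range_none
        intro v h1 h2
        simp only [Bool.not_eq_false', decide_eq_true_iff]
        omega
      simp only []
      rw [havail]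
      have hfill := fill_all n (((PySem.List.pyRange 1 p 1 ++ [p+d]) ++ [n]) ++ [p]) []
          (by intro x hx
              rcases List.mem_append.mp hx with h | h
              · rcases List.mem_append.mp h with h' | h'
                · rcases List.mem_append.mp h' with h'' | h''
                  · rw [PySem.List.mem_pyRange_one] at h''; omega
                  · rw [List.mem_singleton] at h''; omega
                · rw [List.mem_singleton] at h'; omega
              · rw [List.mem_singleton] at h; omega)
          (by simp only [List.length_append, PySem.List.length_pyRange_one,
                List.length_singleton, List.length_nil]
              push_cast
              omega)
      simp only [List.length_nil] at hfill
      rw [hfill, if_neg hdm']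
      have hfilt : (PySem.List.pyRange p n 1).filter (fun v => decide (v ≠ p + d)) = [p] := by
        rw [hnp2, PySem.List.pyRange_one_cons (by omega : p < p+2),
            show PySem.List.pyRange (p+1) (p+2) 1 = [p+1] by
              rw [show p+2 = (p+1)+1 by ring]
              exact PySem.List.pyRange_one_singleton (p+1)]
        simp only [List.filter_cons, List.filter_nil]
        rw [show (decide (p ≠ p + d)) = true by simp; omega,
            show (decide (p+1 ≠ p + d)) = false by simp; omega]
        simp
      rw [hfilt]
      simp [List.append_assoc]

-- ---------- sums ----------

theorem foldl_add_sum (l : List Int) : ∀ a : Int, l.foldl (· + ·) a = a + l.sum := by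
  induction l with
  | nil => intro a; simp
  | cons x xs ih =>
      intro a
      simp only [List.foldl_cons, List.sum_cons, ih]
      ring

theorem pySum_eq_sum (l : List Int) : pySum l = l.sum := by
  rw [pySum, foldl_add_sum]
  ring

-- ---------- operations of the reversed permutation : floor(n^2/4) ----------

theorem Gsum (N : Nat) :
    ((List.range N).map (fun j : Nat => max 0 ((N:Int) - 2*(j:Int) - 1))).sum
      = ((N*N/4 : Nat) : Int) := by
  induction N using Nat.twoStepInduction with
  | zero => simp
  | one => simp
  | more N ih _ =>
      have hsplit : List.range (N+2) = 0 :: (List.range (N+1)).map Nat.succ :=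
        List.range_succ_eq_map
      rw [hsplit]
      simp only [List.map_cons, List.map_map, List.sum_cons]
      have h0 : max 0 (((N+2:Nat):Int) - 2*((0:Nat):Int) - 1) = (N:Int)+1 := by
        push_cast
        rw [max_eq_right (by omega)]
        ring
      have hcomp : ((List.range (N+1)).map
          ((fun j : Nat => max 0 (((N+2:Nat):Int) - 2*(j:Int) - 1)) ∘ Nat.succ)).sum
          = ((List.range (N+1)).map (fun j : Nat => max 0 ((N:Int) - 2*(j:Int) - 1))).sum := by
        congr 1
        apply List.map_congr_left
        intro j hj
        simp only [Function.comp_apply]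
        push_cast
        congr 1
        ring
      have hlast : ((List.range (N+1)).map
          (fun j : Nat => max 0 ((N:Int) - 2*(j:Int) - 1))).sum
          = ((List.range N).map (fun j : Nat => max 0 ((N:Int) - 2*(j:Int) - 1))).sum := by
        rw [List.range_succ, List.map_append, List.sum_append]
        simp only [List.map_cons, List.map_nil, List.sum_cons, List.sum_nil]
        rw [max_eq_left (by omega)]
        ring
      rw [h0, hcomp, hlast, ih]
      rw [show (N+2)*(N+2)/4 = N*N/4 + (N+1) by
            rw [show (N+2)*(N+2) = N*N + (4*N+4) by ring]
            generalize N*N = M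
            omega]
      push_cast
      ring

theorem revops (n : Int) (hn : 0 ≤ n) :
    pySum ((PySem.List.pyRange 0 n 1).map
      (fun i => max 0 (PySem.List.pyGetD (PySem.List.pyRange n 0 (-1)) i 0 - (i+1))))
      = PySem.Int.floordiv (n*n) 4 := by
  obtain ⟨N, rfl⟩ := Int.eq_ofNat_of_zero_le hn
  have hN : (((N:Int))-0).toNat = N := by omega
  have hget : ∀ j : Nat, j < N →
      PySem.List.pyGetD (PySem.List.pyRange (N:Int) 0 (-1)) ((0:Int)+(j:Int)) 0
        = (N:Int) - (j:Int) := by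
    intro j hj
    rw [zero_add, PySem.List.pyGetD_natCast, PySem.List.pyRange_neg_one, hN,
        PySem.List.getD_map_range _ _ _ _ hj]
  have hmap : (PySem.List.pyRange 0 (N:Int) 1).map
      (fun i => max 0 (PySem.List.pyGetD (PySem.List.pyRange (N:Int) 0 (-1)) i 0 - (i+1)))
      = (List.range N).map (fun j : Nat => max 0 ((N:Int) - 2*(j:Int) - 1)) := by
    rw [PySem.List.pyRange_one, List.map_map, show (((N:Int))-0).toNat = N from hN]
    apply List.map_congr_left
    intro j hj
    rw [List.mem_range] at hj
    show max 0 (PySem.List.pyGetD (PySem.List.pyRange (N:Int) 0 (-1))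
        ((0:Int)+(j:Int)) 0 - ((0:Int)+(j:Int)+1)) = _
    rw [hget j hj]
    congr 1
    ring
  rw [hmap, pySum_eq_sum, Gsum]
  exact_mod_cast (PySem.Int.floordiv_natCast (N*N) 4).symm

-- ---------- the scan for the threshold t ----------

theorem tri_ge_sub_one (x : Int) : x - 1 ≤ tri x := by
  by_cases h : x ≤ 1
  · have := tri_nonneg x
    omega
  · have h2 := two_mul_tri x
    have h3 : 2 ≤ x := by omega
    nlinarith [mul_nonneg (show (0:Int) ≤ x-1 by omega) (show (0:Int) ≤ x-2 by omega)]

theorem findT_spec (k : Int) : ∀ (fuel : Nat) (t : Int), (k + 1 - t).toNat ≤ fuel →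
    tri (t-1) < k →
    tri (findT k t - 1) < k ∧ k ≤ tri (findT k t) ∧ t ≤ findT k t := by
  intro fuel
  induction fuel with
  | zero =>
      intro t hf hlt
      rw [findT]
      split
      · rename_i h
        have h' : tri t < k := h
        have hb := tri_ge_sub_one t
        exfalso
        have : t ≤ k := by linarith
        omega
      · rename_i h
        have h' : ¬ tri t < k := h
        exact ⟨hlt, by omega, le_refl t⟩
  | succ fuel ih =>
      intro t hf hlt
      rw [findT]
      split
      · rename_i h
        have h' : tri t < k := h
        have hb := tri_ge_sub_one t
        have ht : t ≤ k := by linarith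
        have hres := ih (t+1) (by omega) (by rw [show t+1-1 = t by ring]; exact h')
        exact ⟨hres.1, hres.2.1, by omega⟩
      · rename_i h
        have h' : ¬ tri t < k := h
        exact ⟨hlt, by omega, le_refl t⟩

theorem findT_one (k : Int) (hk : 1 ≤ k) :
    tri (findT k 1 - 1) < k ∧ k ≤ tri (findT k 1) ∧ 2 ≤ findT k 1 := by
  have h1 : findT k 1 = findT k 2 := by
    rw [findT]
    rw [if_pos (show PySem.Int.floordiv (1*(1-1)) 2 < k from by
      have : tri 1 = 0 := tri_one
      show tri 1 < k
      omega)]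
    norm_num
  rw [h1]
  exact findT_spec k (k+1-2).toNat 2 (le_refl _)
    (by rw [show (2:Int)-1 = 1 by ring, tri_one]; omega)

-- ---------- the equivalence on the precondition ----------

-- ---------- degenerate inputs of construct_proven ----------

theorem proven_nonpos (n k : Int) (hn : n ≤ 0) (hk : ¬ k = 0) (hkm : ¬ k > tri n) :
    construct_proven n k = some [] := by
  unfold construct_proven
  rw [if_neg hk, show PySem.Int.floordiv (n*(n-1)) 2 = tri n from rfl, if_neg hkm]
  dsimp only
  rw [PySem.List.pyRange_one_eq_nil (show n ≤ 0 from hn),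
      PySem.List.pyRange_one_eq_nil (show (n+1:Int) ≤ 1 by omega),
      show n.toNat = 0 from by omega]
  simp

theorem proven_negk (n k : Int) (hn : 0 ≤ n) (hk : k < 0) :
    construct_proven n k = some (PySem.List.pyRange 1 (n+1) 1) := by
  unfold construct_proven
  rw [if_neg (by omega : ¬ k = 0),
      show PySem.Int.floordiv (n*(n-1)) 2 = tri n from rfl,
      if_neg (show ¬ k > tri n from by have := tri_nonneg n; omega)]
  dsimp only
  have hU0 := UsedOK_init n
  have hloop := tail_none n k (List.replicate n.toNat 0)
      (List.replicate (n+1).toNat false) (fun _ => false) hU0 0 (by omega)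
      (by intro pos v hp1 hp2 hv1 hvn
          right
          rintro ⟨h1, h2⟩
          have : 0 ≤ max 0 (v - (pos+1)) := le_max_left _ _
          omega)
  rw [hloop]
  have havail : (PySem.List.pyRange 1 (n+1) 1).filter
      (fun v => !(PySem.List.pyGetD (List.replicate (n+1).toNat false) v false))
      = PySem.List.pyRange 1 (n+1) 1 := by
    rw [avail_eq n _ _ hU0]
    exact filter_range_all _ 1 (n+1) (by intro v h1 h2; rfl)
  simp only []
  rw [havail]
  have hfill := fill_all n [] (PySem.List.pyRange 1 (n+1) 1)
      (by intro x hx; simp at hx)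
      (by simp only [List.length_nil, PySem.List.length_pyRange_one]; push_cast; omega)
  simp only [List.nil_append] at hfill
  rw [show List.replicate n.toNat (0:Int)
        = List.replicate (PySem.List.pyRange 1 (n+1) 1).length 0 from by
      rw [PySem.List.length_pyRange_one]
      congr 1
      omega]
  rw [hfill]

theorem floordiv_sq_nonneg (n : Int) : 0 ≤ PySem.Int.floordiv (n*n) 4 := by
  rw [PySem.Int.floordiv_eq_ediv_of_pos (by omega)]
  exact Int.ediv_nonneg (mul_self_nonneg n) (by omega)

-- ---------- A on negative k : identity (n ≥ 0) ----------

theorem construct_simple_negk (n k : Int) (hn : 0 ≤ n) (hk : k < 0) :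
    construct_simple n k = some (PySem.List.pyRange 1 (n+1) 1) := by
  unfold construct_simple
  rw [if_neg (by omega : ¬ k = 0)]
  dsimp only
  rw [show PySem.Int.floordiv (n*(n-1)) 2 = tri n from rfl,
      if_neg (show ¬ k > tri n from by have := tri_nonneg n; omega),
      if_neg (show ¬ pySum _ = k from by
        rw [revops n hn]
        have := floordiv_sq_nonneg n
        omega)]
  exact proven_negk n k hn hk

-- ---------- the equivalence on the precondition ----------

theorem construct_simple_agrees (n k : Int) (hpre : Pre_construct_simple n k) :
    construct_simple n k = construct_simple_alt n k := by
  obtain ⟨h1, hcorner⟩ := hpre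
  by_cases hkle : k ≤ 0
  · -- B returns the identity; so does A (k = 0, or k < 0 on either sign of n)
    have hB : construct_simple_alt n k = some (PySem.List.pyRange 1 (n+1) 1) := by
      unfold construct_simple_alt
      rw [if_pos hkle]
    rw [hB]
    by_cases hk0 : k = 0
    · unfold construct_simple
      rw [if_pos hk0]
    by_cases hn0 : 0 ≤ n
    · exact construct_simple_negk n k hn0 (by omega)
    · -- n < 0 : A's result is the empty list, which is the (empty) identity
      unfold construct_simple
      rw [if_neg hk0]
      dsimp only
      rw [show PySem.Int.floordiv (n*(n-1)) 2 = tri n from rfl,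
          if_neg (show ¬ k > tri n from by have := tri_nonneg n; omega),
          if_neg (show ¬ pySum _ = k from by
            rw [PySem.List.pyRange_one_eq_nil (show n ≤ 0 by omega)]
            simp [pySum]
            omega)]
      rw [proven_nonpos n k (by omega) hk0 (show ¬ k > tri n from by have := tri_nonneg n; omega),
          PySem.List.pyRange_one_eq_nil (show (n+1:Int) ≤ 1 by omega)]
  · -- 1 ≤ k
    have hk1 : 1 ≤ k := by omega
    by_cases hn0 : 0 ≤ n
    · -- old main path on the natural domain
      by_cases hsmall : n = 2 ∧ k = 1
      · obtain ⟨rfl, rfl⟩ := hsmall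
        have hT : findT 1 1 = 2 := by
          rw [findT, if_pos (by decide), findT, if_neg (by decide)]
          norm_num
        have hB : construct_simple_alt 2 1 = some [2, 1] := by
          unfold construct_simple_alt
          rw [hT]
          decide
        have hA : construct_simple 2 1 = some [2, 1] := by decide
        rw [hA, hB]
      · unfold construct_simple construct_simple_alt
        rw [if_neg (by omega : ¬ k = 0), if_neg hkle]
        dsimp only
        by_cases hkm : k > PySem.Int.floordiv (n*(n-1)) 2
        · rw [if_pos hkm, if_pos hkm]
        rw [if_neg hkm, if_neg hkm]
        have hktri : ¬ k > tri n := hkm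
        have hn2 : 2 ≤ n := by
          by_contra hcon
          have ha : tri n ≤ tri 1 := tri_mono hn0 (by omega)
          have hb := tri_one
          omega
        have hco := revops n hn0
        have hrev : ¬ k = PySem.Int.floordiv (n*n) 4 := by
          intro hEq
          rcases (show 3 ≤ n ∨ n = 2 by omega) with h3 | h2
          · exact hcorner ⟨h3, hEq⟩
          · subst h2
            have hk1' : k = 1 := by rw [hEq]; decide
            exact hsmall ⟨rfl, hk1'⟩
        rw [if_neg (show ¬ pySum _ = k from by rw [hco]; omega)]
        obtain ⟨hlo, hhi, ht2⟩ := findT_one k hk1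
        have htn : findT k 1 ≤ n := by
          by_contra hcon
          have : tri n ≤ tri (findT k 1 - 1) := tri_mono (by omega) (by omega)
          omega
        have h := proven_main n k (findT k 1) hn2 hk1 ht2 htn hlo hhi
        rw [apply_ite some] at h
        exact h
    · -- n < 0 and k ≥ 1 : Pre_ forces k > max_ops, both return none
      have hgt : k > tri n := by
        have h2 := two_mul_tri n
        rcases h1 with h | h | h
        · omega
        · omega
        · omega
      unfold construct_simple construct_simple_alt
      rw [if_neg (by omega : ¬ k = 0), if_neg hkle]
      dsimp only
      rw [if_pos (show k > PySem.Int.floordiv (n*(n-1)) 2 from hgt),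
          if_pos (show k > PySem.Int.floordiv (n*(n-1)) 2 from hgt)]

-- ===== VERDICT (by name: the statement is the Claim_ definition above) =====
theorem construct_simple_spec : Claim_equal_construct_simple := by
  intro n k _ hpre
  unfold Spec_construct_simple
  exact construct_simple_agrees n k hpre
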